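-- pv_equiv track=rewrite | github.com/marcin-michal/product-margin-analyzer | backend/app/services/spreadsheet_parser.py | get_column_mapping_suggestion
-- ===== SOURCE A (Python) =====
-- from typing import Dict
--
-- MAPPING_KEYWORDS = {
--     "ean": ["ean", "barcode", "gtin", "code", "id"],
--     "product": ["product", "name"],
--     "price": ["price", "cost"],
-- }
--
-- def get_column_mapping_suggestion(header_values: list) -> Dict[str, str]:
--     mapping: Dict[str, str] = {}
--
--     for mapped_col, keywords in MAPPING_KEYWORDS.items():
--         found_col_key = None
--
--         for i, val in enumerate(header_values):
--             if any(k in str(val).lower() for k in keywords):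
--                 found_col_key = f"col_{i}"
--                 break
--
--         mapping[mapped_col] = found_col_key
--
--     return mapping
-- ===== SOURCE B (Python) =====
-- MAPPING_KEYWORDS = {
--     "ean": ["ean", "barcode", "gtin", "code", "id"],
--     "product": ["product", "name"],
--     "price": ["price", "cost"],
-- }
--
-- def get_column_mapping_suggestion(header_values: list):
--     mapping = {field: None for field in MAPPING_KEYWORDS}
--     remaining = list(MAPPING_KEYWORDS)
--     for i, val in enumerate(header_values):
--         if not remaining:
--             break
--         text = str(val).lower()
--         for field in list(remaining):
--             if any(k in text for k in MAPPING_KEYWORDS[field]):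
--                 mapping[field] = f"col_{i}"
--                 remaining.remove(field)
--     return mapping
-- ===== Notes on version B (the rewrite author's own statement) =====
-- stated objective: alternative
-- what changed: Replaced A's field-major nested scans (one full pass over the headers per field) with a single column-major pass that lowers each header once, assigns each still-unassigned field on its first matching column, and stops early once all fields are assigned.
import Mathlib
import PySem

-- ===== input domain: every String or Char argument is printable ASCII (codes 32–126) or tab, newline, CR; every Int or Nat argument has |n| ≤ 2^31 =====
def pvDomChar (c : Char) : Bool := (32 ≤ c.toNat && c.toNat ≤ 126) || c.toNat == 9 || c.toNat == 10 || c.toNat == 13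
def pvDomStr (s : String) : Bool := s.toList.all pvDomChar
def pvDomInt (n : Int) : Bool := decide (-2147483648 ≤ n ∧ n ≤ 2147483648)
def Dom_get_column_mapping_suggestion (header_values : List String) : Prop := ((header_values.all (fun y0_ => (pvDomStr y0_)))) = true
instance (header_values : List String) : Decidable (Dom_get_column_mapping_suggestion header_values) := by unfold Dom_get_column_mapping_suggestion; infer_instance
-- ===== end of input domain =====

-- B replaces A's field-major nested scans with a single column-major pass (each header lowered once, early exit when all fields assigned); return values proved equal.


-- ===== PORT A =====
-- inner 'for i, val in enumerate(header_values): if any(k in str(val).lower() for k in keywords): found_col_key = f"col_{i}"; break'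
def pvFindColA (kws : List String) (i : Nat) (vals : List String) : Option String :=
  match vals with
  | [] => none
  | v :: rest =>
    if kws.any (fun k => PySem.Str.isIn k (PySem.Str.lower v)) then
      some ("col_" ++ PySem.Int.toStr (i : Int))
    else
      pvFindColA kws (i + 1) rest

-- outer loop over MAPPING_KEYWORDS.items(); the dict built by insertion is this association list
def get_column_mapping_suggestion (header_values : List String) : List (String × Option String) :=
  [("ean", pvFindColA ["ean", "barcode", "gtin", "code", "id"] 0 header_values),
   ("product", pvFindColA ["product", "name"] 0 header_values),
   ("price", pvFindColA ["price", "cost"] 0 header_values)]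

-- ===== PORT B =====
def pvHit (kws : List String) (text : String) : Bool := kws.any (fun k => PySem.Str.isIn k text)

-- single column-major pass; state = the three mapping entries; early break when none remaining
def pvLoopB (i : Nat) (vals : List String) (e p pr : Option String) : List (String × Option String) :=
  match vals with
  | [] => [("ean", e), ("product", p), ("price", pr)]
  | v :: rest =>
    if e.isSome && p.isSome && pr.isSome then
      [("ean", e), ("product", p), ("price", pr)]
    else
      let text := PySem.Str.lower v
      let c := some ("col_" ++ PySem.Int.toStr (i : Int))
      let e' := if e.isNone && pvHit ["ean", "barcode", "gtin", "code", "id"] text then c else e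
      let p' := if p.isNone && pvHit ["product", "name"] text then c else p
      let pr' := if pr.isNone && pvHit ["price", "cost"] text then c else pr
      pvLoopB (i + 1) rest e' p' pr'

def get_column_mapping_suggestion_alt (header_values : List String) : List (String × Option String) :=
  pvLoopB 0 header_values none none none

-- ===== PRECONDITION & SPEC =====
def Spec_get_column_mapping_suggestion (header_values : List String) (out : List (String × Option String)) : Prop := out = get_column_mapping_suggestion_alt header_values
instance (header_values : List String) (out : List (String × Option String)) : Decidable (Spec_get_column_mapping_suggestion header_values out) := by unfold Spec_get_column_mapping_suggestion; infer_instance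

-- ===== CLAIM (what is proved, stated in full; the proofs are below) =====
def Claim_equal_get_column_mapping_suggestion : Prop := ∀ (header_values : List String), Dom_get_column_mapping_suggestion header_values → Spec_get_column_mapping_suggestion header_values (get_column_mapping_suggestion header_values)

-- ===== LEMMAS AND PROOFS =====
-- fill an empty slot, keep a filled one
def pvFill : Option String → Option String → Option String
  | some a, _ => some a
  | none, x => x

-- one column step: B's conditional assignment into a slot equals A's search advancing one column
theorem pvFill_step (o : Option String) (kws : List String) (v : String) (i : Nat) (rest : List String) :
    pvFill (if o.isNone && pvHit kws (PySem.Str.lower v) then some ("col_" ++ PySem.Int.toStr (i : Int)) else o)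
        (pvFindColA kws (i + 1) rest)
      = pvFill o (pvFindColA kws i (v :: rest)) := by
  cases o with
  | some a => simp [pvFill]
  | none =>
    by_cases h : pvHit kws (PySem.Str.lower v) = true
    · rw [pvFindColA]
      simp only [Option.isNone_none, Bool.true_and, h, if_pos]
      rw [show kws.any (fun k => PySem.Str.isIn k (PySem.Str.lower v)) = true from h, if_pos rfl]
      rfl
    · rw [pvFindColA]
      simp only [Option.isNone_none, Bool.true_and, h]
      rw [show kws.any (fun k => PySem.Str.isIn k (PySem.Str.lower v)) = false from
        Bool.eq_false_iff.mpr h, if_neg (by simp)]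
      rfl

-- B's loop fills each still-empty slot with A's first-match search from the current index
theorem pvLoopB_eq (vals : List String) : ∀ (i : Nat) (e p pr : Option String),
    pvLoopB i vals e p pr =
      [("ean", pvFill e (pvFindColA ["ean", "barcode", "gtin", "code", "id"] i vals)),
       ("product", pvFill p (pvFindColA ["product", "name"] i vals)),
       ("price", pvFill pr (pvFindColA ["price", "cost"] i vals))] := by
  induction vals with
  | nil => intro i e p pr; cases e <;> cases p <;> cases pr <;> rfl
  | cons v rest ih =>
    intro i e p pr
    rw [pvLoopB]
    by_cases hall : (e.isSome && p.isSome && pr.isSome) = true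
    · rw [if_pos hall]
      obtain ⟨⟨he, hp⟩, hpr⟩ := by simpa using hall
      obtain ⟨a, rfl⟩ := Option.isSome_iff_exists.mp he
      obtain ⟨b, rfl⟩ := Option.isSome_iff_exists.mp hp
      obtain ⟨c, rfl⟩ := Option.isSome_iff_exists.mp hpr
      rfl
    · rw [if_neg hall]
      show pvLoopB (i + 1) rest _ _ _ = _
      rw [ih, pvFill_step, pvFill_step, pvFill_step]

-- ===== VERDICT (by name: the statement is the Claim_ definition above) =====
theorem get_column_mapping_suggestion_spec : Claim_equal_get_column_mapping_suggestion := by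
  intro hv _
  unfold Spec_get_column_mapping_suggestion get_column_mapping_suggestion get_column_mapping_suggestion_alt
  rw [pvLoopB_eq]
  rfl
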